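-- pv_equiv track=rewrite | github.com/ShiyuCheng2018/Dealing-With-Data-Assignments | hw1.py | indices_biggest
-- ===== SOURCE A (Python) =====
-- def biggest(matrix):
--     my_biggest = matrix[0][0]
--     for row in matrix:
--         for each in row:
--             if my_biggest < each:
--                 my_biggest = each
--     return my_biggest
--
-- def indices_biggest(matrix):
--     my_biggest = biggest(matrix)
--     my_list = []
--     for row in range(len(matrix)):
--         for each in range(len(matrix[row])):
--             if my_biggest == matrix[row][each]:
--                 my_list.append((row, each))
--     return my_list
-- ===== SOURCE B (Python) =====
-- def indices_biggest(matrix):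
--     best = None
--     out = []
--     i = 0
--     for row in matrix:
--         j = 0
--         for v in row:
--             if best is None or v > best:
--                 best = v
--                 out = [(i, j)]
--             elif v == best:
--                 out.append((i, j))
--             j += 1
--         i += 1
--     return out
-- ===== Notes on version B (the rewrite author's own statement) =====
-- stated objective: alternative
-- what changed: One fused row-major pass that maintains the running maximum and resets/extends the index list on the fly, instead of A's separate max-finding pass followed by a second index-collection pass.
import Mathlib
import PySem

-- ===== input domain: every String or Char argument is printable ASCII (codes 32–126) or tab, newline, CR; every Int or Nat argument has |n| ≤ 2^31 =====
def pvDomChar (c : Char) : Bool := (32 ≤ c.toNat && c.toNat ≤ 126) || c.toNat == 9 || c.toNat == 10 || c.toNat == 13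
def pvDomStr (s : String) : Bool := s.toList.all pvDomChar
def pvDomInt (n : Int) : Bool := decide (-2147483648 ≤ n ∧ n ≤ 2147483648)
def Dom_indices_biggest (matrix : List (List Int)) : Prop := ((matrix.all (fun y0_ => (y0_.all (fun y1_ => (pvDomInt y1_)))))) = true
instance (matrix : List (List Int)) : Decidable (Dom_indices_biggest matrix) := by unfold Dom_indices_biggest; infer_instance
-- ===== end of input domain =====

-- B fuses A's two passes (max-finding, then index collection) into one row-major
-- traversal with a running maximum; same return value on Pre_ (where A does not raise).

-- ===== PORT A =====
-- matrix[0][0] raises IndexError on empty matrix / empty first row; Pre_ excludes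
-- exactly those inputs, so the total stand-in headD is never exercised under Pre_.
def biggest (matrix : List (List Int)) : Int :=
  matrix.foldl (fun b row => row.foldl (fun b e => if b < e then e else b) b)
    ((matrix.headD []).headD 0)

def indices_biggest (matrix : List (List Int)) : List (Int × Int) :=
  let m := biggest matrix
  (matrix.foldl
    (fun (s : List (Int × Int) × Int) row =>
      ((row.foldl
          (fun (t : List (Int × Int) × Int) e =>
            if m = e then (t.1 ++ [(s.2, t.2)], t.2 + 1) else (t.1, t.2 + 1))
          (s.1, 0)).1,
       s.2 + 1))
    ([], 0)).1

-- ===== PORT B =====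
-- one inner-loop step of Source B: state (best, out, j), element v, fixed row index i
def bStep (i : Int) (u : Option Int × List (Int × Int) × Int) (v : Int) :
    Option Int × List (Int × Int) × Int :=
  match u with
  | (some b, out, j) =>
    if b < v then (some v, [(i, j)], j + 1)
    else if v = b then (some b, out ++ [(i, j)], j + 1)
    else (some b, out, j + 1)
  | (none, _, j) => (some v, [(i, j)], j + 1)

def indices_biggest_alt (matrix : List (List Int)) : List (Int × Int) :=
  (matrix.foldl
    (fun (s : Option Int × List (Int × Int) × Int) row =>
      let t := row.foldl (bStep s.2.2) (s.1, s.2.1, 0)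
      (t.1, t.2.1, s.2.2 + 1))
    (none, [], 0)).2.1

-- ===== PRECONDITION & SPEC =====
-- Pre_ excludes exactly the inputs where A raises IndexError: empty matrix, or empty first row.
def Pre_indices_biggest (matrix : List (List Int)) : Prop :=
  matrix ≠ [] ∧ matrix.headD [] ≠ []
instance (matrix : List (List Int)) : Decidable (Pre_indices_biggest matrix) := by
  unfold Pre_indices_biggest; infer_instance

def pvWitness_indices_biggest : List (List Int) := [[1, 2], [2, 0]]

def Spec_indices_biggest (matrix : List (List Int)) (out : List (Int × Int)) : Prop :=
  out = indices_biggest_alt matrix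
instance (matrix : List (List Int)) (out : List (Int × Int)) :
    Decidable (Spec_indices_biggest matrix out) := by unfold Spec_indices_biggest; infer_instance

-- ===== CLAIM (what is proved, stated in full; the proofs are below) =====
def Claim_equal_indices_biggest : Prop :=
  ∀ (matrix : List (List Int)), Dom_indices_biggest matrix →
    Pre_indices_biggest matrix → Spec_indices_biggest matrix (indices_biggest matrix)

-- ===== LEMMAS AND PROOFS =====

-- running maximum over a row / over whole rows (the fold both programs perform)
def rmax (b : Int) (l : List Int) : Int :=
  l.foldl (fun b e => if b < e then e else b) b

def mmax (b : Int) (rows : List (List Int)) : Int :=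
  rows.foldl (fun b r => r.foldl (fun b e => if b < e then e else b) b) b

-- row-major indices of value m in one row (column counter starting at j)
def idxsRow (m i j : Int) (row : List Int) : List (Int × Int) :=
  match row with
  | [] => []
  | v :: t => (if m = v then [(i, j)] else []) ++ idxsRow m i (j + 1) t

-- row-major indices of value m in the rows (row counter starting at i)
def idxsMat (m i : Int) (rows : List (List Int)) : List (Int × Int) :=
  match rows with
  | [] => []
  | r :: t => idxsRow m i 0 r ++ idxsMat m (i + 1) t

theorem le_rmax (b : Int) (l : List Int) : b ≤ rmax b l := by
  induction l generalizing b with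
  | nil => simp [rmax]
  | cons v t ih =>
    have h := ih (if b < v then v else b)
    simp only [rmax, List.foldl] at h ⊢
    by_cases hb : b < v
    · simp only [if_pos hb] at h ⊢; omega
    · simp only [if_neg hb] at h ⊢; omega

theorem mem_le_rmax (b v : Int) (l : List Int) (hv : v ∈ l) : v ≤ rmax b l := by
  induction l generalizing b with
  | nil => simp at hv
  | cons w t ih =>
    simp only [rmax, List.foldl]
    rcases List.mem_cons.1 hv with h | h
    · subst h
      have h1 := le_rmax (if b < v then v else b) t
      simp only [rmax] at h1
      by_cases hb : b < v
      · simp only [if_pos hb] at h1 ⊢; exact h1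
      · simp only [if_neg hb] at h1 ⊢; omega
    · exact ih _ h

theorem le_mmax (b : Int) (rows : List (List Int)) : b ≤ mmax b rows := by
  induction rows generalizing b with
  | nil => simp [mmax]
  | cons r t ih =>
    have h1 : b ≤ rmax b r := le_rmax b r
    have h2 := ih (rmax b r)
    simp only [mmax, rmax, List.foldl] at h1 h2 ⊢
    omega

theorem idxsRow_nil (m i j : Int) (row : List Int) (h : ∀ v ∈ row, v < m) :
    idxsRow m i j row = [] := by
  induction row generalizing j with
  | nil => rfl
  | cons v t ih =>
    have hv : v < m := h v (List.mem_cons_self ..)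
    simp only [idxsRow]
    rw [if_neg (by omega), ih _ (fun w hw => h w (List.mem_cons_of_mem _ hw))]
    rfl

-- A's inner loop collects the indices of m in the row
theorem A_inner (m i : Int) (row : List Int) (acc : List (Int × Int)) (j : Int) :
    row.foldl
      (fun (t : List (Int × Int) × Int) e =>
        if m = e then (t.1 ++ [(i, t.2)], t.2 + 1) else (t.1, t.2 + 1))
      (acc, j)
    = (acc ++ idxsRow m i j row, j + row.length) := by
  induction row generalizing acc j with
  | nil => simp [idxsRow]
  | cons v t ih =>
    simp only [List.foldl, idxsRow]
    split
    · rw [ih]; simp; omega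
    · rw [ih]; simp; omega

-- A's outer loop concatenates the per-row index lists
theorem A_outer (m : Int) (rows : List (List Int)) (acc : List (Int × Int)) (i : Int) :
    rows.foldl
      (fun (s : List (Int × Int) × Int) row =>
        ((row.foldl
            (fun (t : List (Int × Int) × Int) e =>
              if m = e then (t.1 ++ [(s.2, t.2)], t.2 + 1) else (t.1, t.2 + 1))
            (s.1, 0)).1,
         s.2 + 1))
      (acc, i)
    = (acc ++ idxsMat m i rows, i + rows.length) := by
  induction rows generalizing acc i with
  | nil => simp [idxsMat]
  | cons r t ih =>
    simp only [List.foldl, idxsMat]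
    rw [A_inner, ih]
    simp; omega

theorem A_char (matrix : List (List Int)) :
    indices_biggest matrix = idxsMat (biggest matrix) 0 matrix := by
  simp only [indices_biggest]
  rw [A_outer]
  simp

-- B's inner loop from a known best b: new best is rmax b row; the list is reset
-- iff the best improved, and gains the indices of the new best in the row
theorem B_inner (i b j : Int) (out : List (Int × Int)) (row : List Int) :
    row.foldl (bStep i) (some b, out, j)
    = (some (rmax b row),
       (if rmax b row = b then out else []) ++ idxsRow (rmax b row) i j row,
       j + row.length) := by
  induction row generalizing b out j with
  | nil => simp [rmax, idxsRow]
  | cons v t ih =>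
    have hr : rmax b (v :: t) = rmax (if b < v then v else b) t := by
      simp [rmax, List.foldl]
    by_cases hbv : b < v
    · simp only [List.foldl, bStep, if_pos hbv]
      rw [ih]
      have h1 : rmax b (v :: t) = rmax v t := by rw [hr, if_pos hbv]
      have h2 : rmax v t ≠ b := by have := le_rmax v t; omega
      rw [h1]
      simp only [idxsRow, if_neg h2]
      simp; omega
    · have h1 : rmax b (v :: t) = rmax b t := by rw [hr, if_neg hbv]
      by_cases hvb : v = b
      · simp only [List.foldl, bStep, if_neg hbv, if_pos hvb]
        rw [ih, h1]
        subst hvb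
        simp only [idxsRow]
        by_cases he : rmax v t = v
        · simp [he]; omega
        · simp [he]; omega
      · simp only [List.foldl, bStep, if_neg hbv, if_neg hvb]
        rw [ih, h1]
        have h2 : rmax b t ≠ v := by have := le_rmax b t; omega
        simp only [idxsRow, if_neg h2]
        simp; omega

-- B's outer loop from a known best b
theorem B_outer (b i : Int) (out : List (Int × Int)) (rows : List (List Int)) :
    rows.foldl
      (fun (s : Option Int × List (Int × Int) × Int) row =>
        let t := row.foldl (bStep s.2.2) (s.1, s.2.1, 0)
        (t.1, t.2.1, s.2.2 + 1))
      (some b, out, i)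
    = (some (mmax b rows),
       (if mmax b rows = b then out else []) ++ idxsMat (mmax b rows) i rows,
       i + rows.length) := by
  induction rows generalizing b out i with
  | nil => simp [mmax, idxsMat]
  | cons r t ih =>
    have hm : mmax b (r :: t) = mmax (rmax b r) t := by
      simp [mmax, rmax, List.foldl]
    simp only [List.foldl]
    rw [B_inner, ih, hm]
    set M := mmax (rmax b r) t with hM
    have hbr : rmax b r ≤ M := le_mmax _ t
    by_cases h1 : M = rmax b r
    · by_cases h2 : rmax b r = b
      · simp only [h1, h2, idxsMat]
        simp [List.append_assoc]; omega
      · simp only [h1, if_neg h2, idxsMat]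
        simp; omega
    · have h3 : M ≠ b := by have := le_rmax b r; omega
      have h4 : idxsRow M i 0 r = [] := by
        apply idxsRow_nil
        intro v hv
        have := mem_le_rmax b v r hv
        omega
      simp only [if_neg h1, if_neg h3, idxsMat, h4]
      simp; omega

theorem indices_biggest_spec : Claim_equal_indices_biggest := by
  intro matrix _hdom hpre
  obtain ⟨h1, h2⟩ := hpre
  cases matrix with
  | nil => exact absurd rfl h1
  | cons r rest =>
    cases r with
    | nil => exact absurd rfl h2
    | cons v t =>
      unfold Spec_indices_biggest
      rw [A_char]
      -- A's maximum
      have hA : biggest ((v :: t) :: rest) = mmax (rmax v t) rest := by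
        simp only [biggest, List.headD, List.foldl, mmax, rmax]
        have : (if v < v then v else v) = v := by omega
        rw [this]
      -- B's value
      have hB0 : bStep 0 (none, ([], 0)) v = (some v, [(0, 0)], 1) := rfl
      simp only [indices_biggest_alt, List.foldl, hB0]
      rw [B_inner, B_outer, hA]
      set b1 := rmax v t with hb1
      set M := mmax b1 rest with hM
      have hrow : idxsRow b1 0 0 (v :: t)
          = (if b1 = v then [(0, 0)] else []) ++ idxsRow b1 0 1 t := rfl
      by_cases h : M = b1
      · simp only [h, idxsMat, hrow]
        simp [List.append_assoc]
      · have hlt : b1 < M := by have := le_mmax b1 rest; omega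
        have hnil : idxsRow M 0 0 (v :: t) = [] := by
          apply idxsRow_nil
          intro w hw
          rcases List.mem_cons.1 hw with hw | hw
          · have h3 := le_rmax v t; rw [← hb1] at h3; omega
          · have h3 := mem_le_rmax v w t hw; rw [← hb1] at h3; omega
        simp only [if_neg h, idxsMat, hnil]

-- ===== VERDICT (by name: the statement is the Claim_ definition above) =====
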